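-- pv_equiv track=rewrite | github.com/Kathy331/resume-ai-agents | shared/prep_guide_prompts.py | get_linkedin_url
-- ===== SOURCE A (Python) =====
-- from typing import Dict, List, Any, Union
--
-- def get_linkedin_url(citation_links: List[str], interviewer_name: str) -> str:
--     """Find LinkedIn URL for specific interviewer"""
--     for link in citation_links:
--         if 'linkedin.com/in/' in link and interviewer_name.lower() in link.lower():
--             return link
--
--     # Fallback to any LinkedIn link
--     for link in citation_links:
--         if 'linkedin.com' in link:
--             return link
--
--     return ""
-- ===== SOURCE B (Python) =====
-- def get_linkedin_url(citation_links, interviewer_name):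
--     """Find LinkedIn URL for specific interviewer (single pass with fallback)."""
--     fallback = None
--     for link in citation_links:
--         if 'linkedin.com/in/' in link and interviewer_name.lower() in link.lower():
--             return link
--         if fallback is None and 'linkedin.com' in link:
--             fallback = link
--     return fallback if fallback is not None else ""
-- ===== Notes on version B (the rewrite author's own statement) =====
-- stated objective: simpler
-- what changed: Replaces A's two sequential scans with one pass that returns a primary match immediately and remembers the first generic linkedin.com link as a fallback.
import Mathlib
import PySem

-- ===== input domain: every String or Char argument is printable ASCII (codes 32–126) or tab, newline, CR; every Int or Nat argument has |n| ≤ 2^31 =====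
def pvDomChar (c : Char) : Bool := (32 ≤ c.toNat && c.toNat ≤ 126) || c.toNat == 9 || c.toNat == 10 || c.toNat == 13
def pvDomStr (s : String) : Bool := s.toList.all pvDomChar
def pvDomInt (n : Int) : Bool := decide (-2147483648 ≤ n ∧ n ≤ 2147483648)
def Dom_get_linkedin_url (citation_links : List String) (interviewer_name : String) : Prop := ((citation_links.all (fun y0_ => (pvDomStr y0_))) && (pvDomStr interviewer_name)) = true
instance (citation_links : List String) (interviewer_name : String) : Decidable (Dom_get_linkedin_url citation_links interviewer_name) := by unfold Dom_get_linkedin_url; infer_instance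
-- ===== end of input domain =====

-- B does one pass keeping the first generic linkedin.com link as a fallback, instead of A's two scans; objective: simpler.

def pvIsPrimary (interviewer_name link : String) : Bool :=
  PySem.Str.isIn "linkedin.com/in/" link &&
  PySem.Str.isIn (PySem.Str.lower interviewer_name) (PySem.Str.lower link)

def pvIsLinkedin (link : String) : Bool := PySem.Str.isIn "linkedin.com" link

-- ===== PORT A =====
-- first loop: return first link that is a linkedin.com/in/ link containing the name (case-insensitive)
-- second loop: return first link containing linkedin.com; else ""
def get_linkedin_url (citation_links : List String) (interviewer_name : String) : String :=
  match citation_links.find? (fun link => pvIsPrimary interviewer_name link) with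
  | some link => link
  | none =>
    match citation_links.find? (fun link => pvIsLinkedin link) with
    | some link => link
    | none => ""

-- ===== PORT B =====
-- single pass with an Option fallback, mirroring Source B's loop
def get_linkedin_url_alt_go (interviewer_name : String) : List String → Option String → String
  | [], fallback => fallback.getD ""
  | link :: rest, fallback =>
    if pvIsPrimary interviewer_name link then
      link
    else
      get_linkedin_url_alt_go interviewer_name rest
        (if fallback.isNone && pvIsLinkedin link then some link else fallback)

def get_linkedin_url_alt (citation_links : List String) (interviewer_name : String) : String :=
  get_linkedin_url_alt_go interviewer_name citation_links none

-- ===== PRECONDITION & SPEC =====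
def Spec_get_linkedin_url (citation_links : List String) (interviewer_name : String) (out : String) : Prop := out = get_linkedin_url_alt citation_links interviewer_name
instance (citation_links : List String) (interviewer_name : String) (out : String) : Decidable (Spec_get_linkedin_url citation_links interviewer_name out) := by unfold Spec_get_linkedin_url; infer_instance

-- ===== CLAIM (what is proved, stated in full; the proofs are below) =====
def Claim_equal_get_linkedin_url : Prop := ∀ (citation_links : List String) (interviewer_name : String), Dom_get_linkedin_url citation_links interviewer_name → Spec_get_linkedin_url citation_links interviewer_name (get_linkedin_url citation_links interviewer_name)

-- ===== LEMMAS AND PROOFS =====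
theorem alt_go_spec (name : String) (cs : List String) (fb : Option String) :
    get_linkedin_url_alt_go name cs fb =
      match cs.find? (fun link => pvIsPrimary name link) with
      | some link => link
      | none =>
        match fb with
        | some f => f
        | none =>
          match cs.find? (fun link => pvIsLinkedin link) with
          | some link => link
          | none => "" := by
  induction cs generalizing fb with
  | nil => cases fb <;> simp [get_linkedin_url_alt_go]
  | cons l rest ih =>
    simp only [get_linkedin_url_alt_go, List.find?_cons]
    cases hp : pvIsPrimary name l with
    | true => simp [hp]
    | false =>
      cases fb with
      | some f => simp [hp, ih]
      | none =>
        cases hq : pvIsLinkedin l with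
        | true => simp [hp, ih]
        | false => simp [hp, ih]

-- ===== VERDICT (by name: the statement is the Claim_ definition above) =====
theorem get_linkedin_url_spec : Claim_equal_get_linkedin_url := by
  intro cs name _
  unfold Spec_get_linkedin_url get_linkedin_url get_linkedin_url_alt
  rw [alt_go_spec]
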